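-- pv_equiv track=rewrite | github.com/quantumbagel/adventofcode | 2023/day3/tyler.py | process_gear_part
-- ===== SOURCE A (Python) =====
-- def process_gear_part(lines: list[str], row: int, column: int) -> (int, int):
--     """
--     Looks for and returns an integer with one of its characters stored at
--     the given coordinates. Looks both forwards and backwards in the line,
--     stopping at either a non-digit or the end of a line.\n\n
--     Also gives the column of the first digit in the number.
--
--     :param lines: the list of lines
--     :param row: the starting row
--     :param column: the starting column
--     :return: the number stored at given coordinates, and the column of the first digit
--     """
--     digits = lines[row][column]  # Use it as a string to help with flexible concatenation
--
--     # start by moving to the left of the starting coords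
--     left = column - 1
--     while left >= 0 and lines[row][left].isdigit():
--         digits = lines[row][left] + digits  # Add new digits at front of number
--         left -= 1
--
--     # now we move to the right of the starting coords
--     right = column + 1
--     while right < len(lines[row]) and lines[row][right].isdigit():
--         digits = digits + lines[row][right]  # Add new digits at back of number
--         right += 1
--
--     return int(digits), left + 1
-- ===== SOURCE B (Python) =====
-- def process_gear_part(lines: list[str], row: int, column: int) -> (int, int):
--     """Slice-based reimplementation: measure the digit run ending just before the
--     column with rstrip and the one starting just after it with lstrip, then take
--     int() of the single slice spanning both runs and the column character."""
--     line = lines[row]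
--     head = line[:column]
--     tail = line[column + 1:]
--     start = column - (len(head) - len(head.rstrip('0123456789')))
--     end = column + 1 + (len(tail) - len(tail.lstrip('0123456789')))
--     return int(line[start:end]), start
-- ===== Notes on version B (the rewrite author's own statement) =====
-- stated objective: idiomatic
-- what changed: A scans outward from the coordinate with two char-by-char while loops concatenating a digit string; B instead slices the line around the column, measures the two adjacent digit runs with rstrip/lstrip of the digit set, and returns int() of the single slice spanning both runs.
-- outside the precondition, e.g. on process_gear_part(['12'], 0, -1): A returns (212, -1), B returns (12, -2)
import Mathlib
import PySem

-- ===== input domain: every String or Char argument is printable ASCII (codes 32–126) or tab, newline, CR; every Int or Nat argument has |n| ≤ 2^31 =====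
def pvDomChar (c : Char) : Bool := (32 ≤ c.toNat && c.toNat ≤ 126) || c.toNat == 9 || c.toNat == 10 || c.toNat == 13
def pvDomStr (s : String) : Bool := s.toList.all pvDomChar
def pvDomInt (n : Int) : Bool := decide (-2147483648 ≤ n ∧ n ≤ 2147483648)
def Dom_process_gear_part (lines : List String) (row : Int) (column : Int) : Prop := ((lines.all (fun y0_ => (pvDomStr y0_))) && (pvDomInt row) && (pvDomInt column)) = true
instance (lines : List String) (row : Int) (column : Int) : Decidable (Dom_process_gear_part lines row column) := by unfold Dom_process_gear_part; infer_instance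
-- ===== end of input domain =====

-- A scans char by char left and right out from the coordinate, concatenating a digit string;
-- B instead measures the two adjacent digit runs with rstrip/lstrip over slices and takes
-- int() of one slice spanning them (objective: simpler/idiomatic decomposition, same cost).

-- ===== PORT A =====

-- A's left loop: `while left >= 0 and lines[row][left].isdigit(): digits = lines[row][left] + digits; left -= 1`.
-- The digit string is carried as a List Char; `getD _ ' '` is the in-range index (inside Pre_ the
-- guard `0 ≤ left < column < len` keeps it in range, so no IndexError can occur here).
def pgpLeftA (cs : List Char) (left : Int) (acc : List Char) : List Char × Int :=
  if 0 ≤ left then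
    let c := cs.getD left.toNat ' '
    if PySem.Chars.isdigit c then pgpLeftA cs (left - 1) (c :: acc) else (acc, left)
  else (acc, left)
termination_by (left + 1).toNat
decreasing_by omega

-- A's right loop: `while right < len(lines[row]) and lines[row][right].isdigit(): digits += lines[row][right]; right += 1`.
def pgpRightA (cs : List Char) (right : Int) (acc : List Char) : List Char :=
  if _h : right < (cs.length : Int) then
    let c := cs.getD right.toNat ' '
    if PySem.Chars.isdigit c then pgpRightA cs (right + 1) (acc ++ [c]) else acc
  else acc
termination_by ((cs.length : Int) - right).toNat
decreasing_by omega

def process_gear_part (lines : List String) (row : Int) (column : Int) : Int × Int :=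
  match PySem.List.pyGet? lines row with
  | none => (0, 0)      -- lines[row] raises IndexError: excluded by Pre_
  | some s =>
    match PySem.Str.pyGet? s column with
    | none => (0, 0)    -- lines[row][column] raises IndexError: excluded by Pre_
    | some c =>
      let cs := s.toList
      let r1 := pgpLeftA cs (column - 1) [c]
      let ds := pgpRightA cs (column + 1) r1.1
      ((PySem.Int.ofChars? ds).getD 0, r1.2 + 1)   -- int(digits); ValueError excluded by Pre_

-- ===== PORT B =====

-- head.rstrip('0123456789'): drop the trailing characters belonging to the set (exact hand
-- port of Python str.rstrip with a chars argument, on List Char).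
def pgpRstripDigits (cs : List Char) : List Char :=
  (cs.reverse.dropWhile (fun c => ("0123456789".toList).contains c)).reverse

-- tail.lstrip('0123456789'): drop the leading characters belonging to the set (exact hand
-- port of Python str.lstrip with a chars argument, on List Char).
def pgpLstripDigits (cs : List Char) : List Char :=
  cs.dropWhile (fun c => ("0123456789".toList).contains c)

def process_gear_part_alt (lines : List String) (row : Int) (column : Int) : Int × Int :=
  match PySem.List.pyGet? lines row with
  | none => (0, 0)      -- lines[row] raises IndexError: excluded by Pre_
  | some line =>
    let cs := line.toList
    let head := PySem.List.slice cs none (some column)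
    let tail := PySem.List.slice cs (some (column + 1)) none
    let start : Int := column - ((head.length : Int) - ((pgpRstripDigits head).length : Int))
    let stop : Int := column + 1 + ((tail.length : Int) - ((pgpLstripDigits tail).length : Int))
    ((PySem.Int.ofChars? (PySem.List.slice cs (some start) (some stop))).getD 0, start)
    -- int(line[start:stop]); ValueError excluded by Pre_

-- ===== PRECONDITION & SPEC =====

-- proof-side descriptions of the two digit runs adjacent to position j (also used by Pre_)
def pgpL (cs : List Char) (j : Nat) : List Char :=
  (((cs.take j).reverse.takeWhile PySem.Chars.isdigit)).reverse
def pgpR (cs : List Char) (j : Nat) : List Char :=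
  (cs.drop (j + 1)).takeWhile PySem.Chars.isdigit

-- Pre_ excludes the inputs where A raises: row out of range or column out of the line's range
-- (IndexError), and in-range columns where int() of the assembled string fails (ValueError) —
-- the disjunction below is exactly when that string `L ++ [c] ++ R` built from the adjacent
-- digit runs parses as a Python int. It additionally excludes negative columns, on some of
-- which A still returns a value assembled from Python's negative-index wraparound mixed with
-- unwrapped scan bounds — an accident of A's implementation that B does not reproduce.
-- the int() parse condition for the string `L ++ [c] ++ R` around position j
def pgpParseOk (cs : List Char) (j : Nat) : Bool :=
  let c := cs.getD j ' '
  let L := pgpL cs j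
  let R := pgpR cs j
  PySem.Chars.isdigit c
    || ((c == '+' || c == '-') && L.isEmpty && !R.isEmpty)
    || (c == '_' && !L.isEmpty && !R.isEmpty)
    || (PySem.Chars.isspace c && (L.isEmpty || R.isEmpty) && !(L.isEmpty && R.isEmpty))

def Pre_process_gear_part (lines : List String) (row : Int) (column : Int) : Prop :=
  ((PySem.List.pyGet? lines row).any (fun s =>
    decide (0 ≤ column) && decide (column < (s.toList.length : Int))
      && pgpParseOk s.toList column.toNat)) = true
instance (lines : List String) (row : Int) (column : Int) : Decidable (Pre_process_gear_part lines row column) := by unfold Pre_process_gear_part; infer_instance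

def pvWitness_process_gear_part : List String × Int × Int := (["a123b."], 0, 2)

def Spec_process_gear_part (lines : List String) (row : Int) (column : Int) (out : Int × Int) : Prop := out = process_gear_part_alt lines row column
instance (lines : List String) (row : Int) (column : Int) (out : Int × Int) : Decidable (Spec_process_gear_part lines row column out) := by unfold Spec_process_gear_part; infer_instance

-- ===== CLAIM (what is proved, stated in full; the proofs are below) =====
def Claim_equal_process_gear_part : Prop := ∀ (lines : List String) (row : Int) (column : Int), Dom_process_gear_part lines row column → Pre_process_gear_part lines row column → Spec_process_gear_part lines row column (process_gear_part lines row column)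

-- ===== LEMMAS AND PROOFS =====

theorem pgp_contains_eq_isdigit :
    (fun c => (("0123456789".toList).contains c)) = PySem.Chars.isdigit := by
  funext c
  have h : "0123456789".toList = ['0','1','2','3','4','5','6','7','8','9'] := rfl
  rw [h]
  simp only [PySem.Chars.isdigit, List.contains_cons, List.contains_nil, Bool.or_false]
  rw [Bool.eq_iff_iff]
  simp [Char.ext_iff, Char.le_def, UInt32.le_iff_toNat_le, UInt32.ext_iff]
  omega

theorem pgpL_length_le (cs : List Char) (j : Nat) : (pgpL cs j).length ≤ j := by
  have h1 := (List.takeWhile_sublist (p := PySem.Chars.isdigit)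
    (l := (cs.take j).reverse)).length_le
  simp [pgpL] at h1 ⊢
  omega

theorem pgpL_succ (cs : List Char) (k : Nat) (hk : k < cs.length) :
    pgpL cs (k + 1) = if PySem.Chars.isdigit cs[k] then pgpL cs k ++ [cs[k]] else [] := by
  have h1 : cs.take (k + 1) = cs.take k ++ [cs[k]] := by
    rw [List.take_add_one]; simp [List.getElem?_eq_getElem hk]
  rw [pgpL, h1, List.reverse_append]
  simp only [List.reverse_cons, List.reverse_nil, List.nil_append]
  split <;> rename_i h <;> simp [pgpL, h]

theorem pgpLeftA_eq (cs : List Char) : ∀ (k : Nat), k ≤ cs.length → ∀ (acc : List Char),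
    pgpLeftA cs ((k : Int) - 1) acc =
      (pgpL cs k ++ acc, (k : Int) - (pgpL cs k).length - 1) := by
  intro k
  induction k with
  | zero => intro _ acc; rw [pgpLeftA]; simp [pgpL]
  | succ k ih =>
    intro hk acc
    have hklt : k < cs.length := by omega
    have h0 : ((k + 1 : Nat) : Int) - 1 = (k : Int) := by push_cast; ring
    rw [h0, pgpLeftA]
    have hc : cs.getD ((k : Int)).toNat ' ' = cs[k] := by
      simp [List.getD_eq_getElem?_getD, List.getElem?_eq_getElem hklt]
    rw [if_pos (by positivity : (0 : Int) ≤ (k : Int))]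
    simp only [hc]
    by_cases hd : PySem.Chars.isdigit cs[k] = true
    · rw [if_pos hd]
      rw [ih (by omega) (cs[k] :: acc), pgpL_succ cs k hklt, if_pos hd]
      refine Prod.ext (by simp) (by simp)
    · rw [if_neg hd, pgpL_succ cs k hklt, if_neg hd]
      simp

theorem pgpRightA_eq (cs : List Char) : ∀ (r : Nat) (acc : List Char),
    pgpRightA cs (r : Int) acc = acc ++ (cs.drop r).takeWhile PySem.Chars.isdigit := by
  have H : ∀ (m r : Nat), cs.length - r = m → ∀ (acc : List Char),
      pgpRightA cs (r : Int) acc = acc ++ (cs.drop r).takeWhile PySem.Chars.isdigit := by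
    intro m
    induction m with
    | zero =>
      intro r hr acc
      rw [pgpRightA, dif_neg (by omega : ¬ ((r : Int) < (cs.length : Int)))]
      rw [List.drop_eq_nil_of_le (by omega)]
      simp
    | succ m ih =>
      intro r hr acc
      have hrlt : r < cs.length := by omega
      rw [pgpRightA, dif_pos (by exact_mod_cast hrlt)]
      have hc : cs.getD ((r : Int)).toNat ' ' = cs[r] := by
        simp [List.getD_eq_getElem?_getD, List.getElem?_eq_getElem hrlt]
      simp only [hc]
      have hdrop : cs.drop r = cs[r] :: cs.drop (r + 1) := List.drop_eq_getElem_cons hrlt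
      by_cases hd : PySem.Chars.isdigit cs[r] = true
      · rw [if_pos hd]
        have h1 := ih (r + 1) (by omega) (acc ++ [cs[r]])
        push_cast at h1
        rw [h1, hdrop, List.takeWhile_cons, if_pos hd]
        simp
      · rw [if_neg hd, hdrop, List.takeWhile_cons, if_neg hd]
        simp
  intro r acc
  exact H (cs.length - r) r rfl acc

theorem pgp_slice_eq (cs : List Char) (j : Nat) (hj : j < cs.length) :
    (cs.drop (j - (pgpL cs j).length)).take (j + 1 + (pgpR cs j).length - (j - (pgpL cs j).length))
      = pgpL cs j ++ cs[j] :: pgpR cs j := by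
  have hle : (pgpL cs j).length ≤ j := pgpL_length_le cs j
  have hsplit := List.takeWhile_append_dropWhile (p := PySem.Chars.isdigit)
    (l := (cs.take j).reverse)
  have h1 : cs.take j
      = ((cs.take j).reverse.dropWhile PySem.Chars.isdigit).reverse ++ pgpL cs j := by
    have h := congrArg List.reverse hsplit
    simp only [List.reverse_append, List.reverse_reverse] at h
    rw [pgpL]; exact h.symm
  have hlenP : (((cs.take j).reverse.dropWhile PySem.Chars.isdigit).reverse).length
      = j - (pgpL cs j).length := by
    have h := congrArg List.length h1
    simp only [List.length_append, List.length_take, List.length_reverse] at h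
    simp only [List.length_reverse]
    omega
  have hcs : cs = (((cs.take j).reverse.dropWhile PySem.Chars.isdigit).reverse)
      ++ (pgpL cs j ++ cs[j] :: cs.drop (j + 1)) := by
    conv_lhs => rw [← List.take_append_drop j cs, List.drop_eq_getElem_cons hj, h1]
    simp [List.append_assoc]
  have hdrop : cs.drop (j - (pgpL cs j).length) = pgpL cs j ++ cs[j] :: cs.drop (j + 1) := by
    have h2 := congrArg (List.drop (j - (pgpL cs j).length)) hcs
    rw [h2, List.drop_left' hlenP]
  rw [hdrop,
    show j + 1 + (pgpR cs j).length - (j - (pgpL cs j).length)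
      = (pgpL cs j).length + ((pgpR cs j).length + 1) from by omega]
  rw [List.take_append, List.take_of_length_le (by omega), Nat.add_sub_cancel_left,
    List.take_succ_cons]
  have hR : (cs.drop (j + 1)).take (pgpR cs j).length = pgpR cs j := by
    conv_lhs => rw [← List.takeWhile_append_dropWhile (p := PySem.Chars.isdigit)
      (l := cs.drop (j + 1))]
    exact List.take_left
  rw [hR, pgpR]

-- length of the digit run measured by rstrip over a list
theorem pgpRstrip_length (cs : List Char) :
    cs.length - (pgpRstripDigits cs).length
      = (cs.reverse.takeWhile PySem.Chars.isdigit).length := by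
  have h := congrArg List.length
    (List.takeWhile_append_dropWhile (p := PySem.Chars.isdigit) (l := cs.reverse))
  simp only [List.length_append, List.length_reverse] at h
  rw [pgpRstripDigits, pgp_contains_eq_isdigit]
  simp only [List.length_reverse]
  omega

theorem pgpLstrip_length (cs : List Char) :
    cs.length - (pgpLstripDigits cs).length
      = (cs.takeWhile PySem.Chars.isdigit).length := by
  have h := congrArg List.length
    (List.takeWhile_append_dropWhile (p := PySem.Chars.isdigit) (l := cs))
  simp only [List.length_append] at h
  rw [pgpLstripDigits, pgp_contains_eq_isdigit]
  omega

-- ===== VERDICT (by name: the statement is the Claim_ definition above) =====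
theorem process_gear_part_spec : Claim_equal_process_gear_part := by
  intro lines row column _dom pre
  unfold Pre_process_gear_part at pre
  unfold Spec_process_gear_part
  cases hrow : PySem.List.pyGet? lines row with
  | none => rw [hrow] at pre; simp at pre
  | some s =>
    rw [hrow] at pre
    simp only [Option.any_some, Bool.and_eq_true, decide_eq_true_eq] at pre
    obtain ⟨⟨hc0, hclt⟩, -⟩ := pre
    have hcol2 : column = (column.toNat : Int) := (Int.toNat_of_nonneg hc0).symm
    have hj : column.toNat < s.toList.length := by omega
    obtain ⟨cv, hcv⟩ : ∃ cv, s.toList[column.toNat] = cv := ⟨_, rfl⟩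
    have hcol : PySem.Str.pyGet? s column = some cv := by
      conv_lhs => rw [hcol2, PySem.Str.pyGet?_natCast]
      rw [List.getElem?_eq_getElem hj, hcv]
    have hle : (pgpL s.toList column.toNat).length ≤ column.toNat :=
      pgpL_length_le s.toList column.toNat
    have hA1 := pgpLeftA_eq s.toList column.toNat (le_of_lt hj) [cv]
    have hA2 := pgpRightA_eq s.toList (column.toNat + 1)
      (pgpL s.toList column.toNat ++ [cv])
    simp only [process_gear_part, process_gear_part_alt, hrow, hcol]
    rw [hcol2]
    rw [hA1]
    rw [show ((column.toNat : Int) + 1) = ((column.toNat + 1 : Nat) : Int) from by push_cast; ring]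
    rw [hA2]
    rw [PySem.List.slice_to_natCast, PySem.List.slice_from_natCast]
    have hstart : (column.toNat : Int) - (((s.toList.take column.toNat).length : Int)
        - ((pgpRstripDigits (s.toList.take column.toNat)).length : Int))
        = ((column.toNat - (pgpL s.toList column.toNat).length : Nat) : Int) := by
      have h1 := pgpRstrip_length (s.toList.take column.toNat)
      have h3 : (pgpL s.toList column.toNat).length
          = ((s.toList.take column.toNat).reverse.takeWhile PySem.Chars.isdigit).length := by
        simp [pgpL]
      have h4 : (s.toList.take column.toNat).length = column.toNat := by
        rw [List.length_take]; omega
      have h5 : (pgpRstripDigits (s.toList.take column.toNat)).length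
          ≤ (s.toList.take column.toNat).length := by
        rw [pgpRstripDigits, List.length_reverse]
        exact ((List.dropWhile_sublist _).length_le).trans (by rw [List.length_reverse])
      omega
    have hstop : (((column.toNat + 1 : Nat)) : Int) + (((s.toList.drop (column.toNat + 1)).length : Int)
        - ((pgpLstripDigits (s.toList.drop (column.toNat + 1))).length : Int))
        = ((column.toNat + 1 + (pgpR s.toList column.toNat).length : Nat) : Int) := by
      have h1 := pgpLstrip_length (s.toList.drop (column.toNat + 1))
      have h3 : (pgpR s.toList column.toNat).length
          = ((s.toList.drop (column.toNat + 1)).takeWhile PySem.Chars.isdigit).length := rfl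
      have h5 : (pgpLstripDigits (s.toList.drop (column.toNat + 1))).length
          ≤ (s.toList.drop (column.toNat + 1)).length := by
        rw [pgpLstripDigits]
        exact (List.dropWhile_sublist _).length_le
      omega
    rw [hstart, hstop, PySem.List.slice_natCast, pgp_slice_eq s.toList column.toNat hj, hcv]
    refine Prod.ext ?_ ?_
    · simp [pgpR]
    · simp
      omega
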